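-- pv_equiv track=rewrite | github.com/Aasthaengg/IBMdataset | Python_codes/p02985/s534615535.py | fact_all
-- ===== SOURCE A (Python) =====
-- mod = 10**9 + 7
--
-- def fact_all(n,M=mod):
--     f = [1]*(n)
--     ans = 1
--     for i in range(1,n):
--         ans = ans*i
--         ans = ans%M
--         f[i] = ans
--     return f
-- ===== SOURCE B (Python) =====
-- mod = 10**9 + 7
--
-- def _pscan(xs, M):
--     # exclusive prefix products of xs mod M (leading 1), plus the total product mod M,
--     # by divide and conquer on the list
--     if len(xs) == 1:
--         return [1], xs[0] % M
--     mid = len(xs) // 2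
--     L, pl = _pscan(xs[:mid], M)
--     R, pr = _pscan(xs[mid:], M)
--     return L + [pl * r % M for r in R], pl * pr % M
--
-- def fact_all(n, M=mod):
--     if n <= 0:
--         return []
--     if n == 1:
--         return [1]
--     pre, tot = _pscan(list(range(1, n)), M)
--     return pre + [tot]
-- ===== Notes on version B (the rewrite author's own statement) =====
-- stated objective: alternative
-- what changed: B replaces A's single left-to-right accumulator loop with a divide-and-conquer prefix-product scan: it recursively splits the multiplier list in half, scans each half independently, and combines by multiplying the left half's total into the right half's prefixes (correct because mod distributes over multiplication).
import Mathlib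
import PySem

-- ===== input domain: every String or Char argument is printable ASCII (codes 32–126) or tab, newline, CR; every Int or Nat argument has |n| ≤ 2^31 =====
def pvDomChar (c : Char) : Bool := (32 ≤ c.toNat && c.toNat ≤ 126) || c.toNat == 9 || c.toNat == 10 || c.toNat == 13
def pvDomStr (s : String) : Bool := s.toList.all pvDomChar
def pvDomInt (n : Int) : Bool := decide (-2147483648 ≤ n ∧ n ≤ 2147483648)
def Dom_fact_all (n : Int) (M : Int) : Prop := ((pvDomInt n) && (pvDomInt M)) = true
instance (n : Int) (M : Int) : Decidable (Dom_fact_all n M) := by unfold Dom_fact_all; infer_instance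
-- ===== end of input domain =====

-- B replaces A's sequential accumulator loop by a divide-and-conquer prefix-product scan
-- (objective: alternative; mod distributes over multiplication, so the association does not matter).

-- ===== PORT A =====
def fact_all (n : Int) (M : Int) : List Int :=
  let f : List Int := List.replicate n.toNat 1        -- f = [1]*(n)
  let r := (PySem.List.pyRange 1 n 1).foldl
    (fun (st : List Int × Int) i =>
      let ans := st.2 * i
      let ans := PySem.Int.mod ans M
      (PySem.List.pySetD st.1 i ans, ans))            -- f[i] = ans (0 ≤ i < len f always here)
    (f, 1)
  r.1

-- ===== PORT B =====
-- _pscan: the 'len(xs) == 1' test is ported as 'length ≤ 1', which only totalizes the empty list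
-- (on which Python's _pscan would recurse forever; fact_all never passes it)
def pvPscan (M : Int) (xs : List Int) : List Int × Int :=
  if _h : xs.length ≤ 1 then
    ([1], PySem.Int.mod (PySem.List.pyGetD xs 0 0) M)                 -- return [1], xs[0] % M
  else
    let mid : Nat := xs.length / 2                                    -- mid = len(xs) // 2
    let L := pvPscan M (PySem.List.slice xs none (some (mid:Int)))    -- xs[:mid]
    let R := pvPscan M (PySem.List.slice xs (some (mid:Int)) none)    -- xs[mid:]
    (L.1 ++ R.1.map (fun r => PySem.Int.mod (L.2 * r) M), PySem.Int.mod (L.2 * R.2) M)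
termination_by xs.length
decreasing_by
  · rw [PySem.List.slice_to_natCast]
    simp only [List.length_take]
    omega
  · rw [PySem.List.slice_from_natCast]
    simp only [List.length_drop]
    omega

def fact_all_alt (n : Int) (M : Int) : List Int :=
  if n ≤ 0 then []
  else if n = 1 then [1]
  else
    let p := pvPscan M (PySem.List.pyRange 1 n 1)
    p.1 ++ [p.2]

-- ===== PRECONDITION & SPEC =====
-- Pre_ excludes exactly the inputs on which Python A raises ZeroDivisionError (n ≥ 2 with M = 0);
-- Python B raises there too.
def Pre_fact_all (n : Int) (M : Int) : Prop := n ≤ 1 ∨ M ≠ 0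
instance (n : Int) (M : Int) : Decidable (Pre_fact_all n M) := by unfold Pre_fact_all; infer_instance
def pvWitness_fact_all : Int × Int := (6, 7)
def Spec_fact_all (n : Int) (M : Int) (out : List Int) : Prop := out = fact_all_alt n M
instance (n : Int) (M : Int) (out : List Int) : Decidable (Spec_fact_all n M out) := by unfold Spec_fact_all; infer_instance

-- ===== CLAIM (what is proved, stated in full; the proofs are below) =====
def Claim_equal_fact_all : Prop := ∀ (n : Int) (M : Int), Dom_fact_all n M → Pre_fact_all n M → Spec_fact_all n M (fact_all n M)

-- ===== LEMMAS AND PROOFS =====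

-- A's running value: pvAns M i is the iteratively reduced i-th table entry
def pvAns (M : Int) : Nat → Int
  | 0 => 1
  | k + 1 => PySem.Int.mod (pvAns M k * ((k : Int) + 1)) M

-- A's list after the writes for indices < j: entries < j final, entries ≥ j still the preallocated 1
def pvF (M : Int) (m j : Nat) : List Int := (List.range m).map (fun i => if i < j then pvAns M i else 1)
def pvStep (M : Int) (st : List Int × Int) (i : Int) : List Int × Int :=
  (PySem.List.pySetD st.1 i (PySem.Int.mod (st.2 * i) M), PySem.Int.mod (st.2 * i) M)

lemma pvFoldEq (n M : Int) :
    fact_all n M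
      = ((PySem.List.pyRange 1 n 1).foldl (pvStep M) (List.replicate n.toNat 1, 1)).1 := rfl

lemma pvAnsStep (M : Int) (j : Nat) (hj : 1 ≤ j) :
    PySem.Int.mod (pvAns M (j-1) * (j : Int)) M = pvAns M j := by
  obtain ⟨k, rfl⟩ : ∃ k, j = k + 1 := ⟨j - 1, by omega⟩
  have : ((k + 1 : Nat) : Int) = (k : Int) + 1 := by push_cast; ring
  simp [pvAns, this]

lemma pvStepEq (M : Int) (m j : Nat) (hj : 1 ≤ j) (_hjm : j < m) :
    pvStep M (pvF M m j, pvAns M (j-1)) (j : Int) = (pvF M m (j+1), pvAns M j) := by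
  unfold pvStep
  rw [pvAnsStep M j hj]
  have hset : PySem.List.pySetD (pvF M m j) ((j:Int)) (pvAns M j) = pvF M m (j+1) := by
    rw [PySem.List.pySetD_of_nonneg _ _ (by positivity), Int.toNat_natCast]
    apply List.ext_getElem
    · simp [pvF]
    · intro i h1 h2
      simp only [pvF, List.getElem_set, List.getElem_map, List.getElem_range]
      split_ifs <;> first | rfl | omega | simp_all
  exact congrArg₂ Prod.mk hset rfl

lemma pvLoop (M : Int) (m : Nat) :
    ∀ d j : Nat, 1 ≤ j → j + d = m →
      (PySem.List.pyRange (j:Int) (m:Int) 1).foldl (pvStep M) (pvF M m j, pvAns M (j-1))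
        = (pvF M m m, pvAns M (m-1)) := by
  intro d
  induction d with
  | zero =>
    intro j h1 h2
    have hjm : j = m := by omega
    subst hjm
    rw [PySem.List.pyRange_one_eq_nil le_rfl]
    simp only [List.foldl_nil]
  | succ d ih =>
    intro j h1 h2
    have hjm : j < m := by omega
    rw [PySem.List.pyRange_one_cons (by exact_mod_cast hjm)]
    simp only [List.foldl_cons]
    rw [pvStepEq M m j h1 hjm]
    have hcast : ((j:Int) + 1) = ((j+1 : Nat) : Int) := by push_cast; ring
    rw [hcast]
    have := ih (j+1) (by omega) (by omega)
    simpa using this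

lemma pvLoopOne (M : Int) (m : Nat) (hm : 1 ≤ m) :
    (PySem.List.pyRange 1 (m:Int) 1).foldl (pvStep M) (pvF M m 1, 1) = (pvF M m m, pvAns M (m-1)) := by
  have h := pvLoop M m (m-1) 1 le_rfl (by omega)
  simpa [pvAns] using h

lemma pvReplicateEq (M : Int) (m : Nat) : List.replicate m (1:Int) = pvF M m 1 := by
  apply List.ext_getElem
  · simp [pvF]
  · intro i h1 h2
    simp only [List.getElem_replicate, pvF, List.getElem_map, List.getElem_range]
    split_ifs with h
    · have : i = 0 := by omega
      subst this
      rfl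
    · rfl

-- A's table is [pvAns 0, …, pvAns (m-1)]
lemma pvAEq (M : Int) (m : Nat) (hm : 1 ≤ m) :
    fact_all (m : Int) M = (List.range m).map (pvAns M) := by
  rw [pvFoldEq]
  simp only [Int.toNat_natCast]
  rw [pvReplicateEq M, pvLoopOne M m hm]
  show pvF M m m = _
  unfold pvF
  exact List.map_congr_left (fun a ha => by rw [if_pos (List.mem_range.mp ha)])

-- Python mod is determined by the residue class (for a nonzero modulus)
lemma pvModDvdSub (a M : Int) : M ∣ (a - PySem.Int.mod a M) := by
  have h := PySem.Int.floordiv_mul_add_mod a M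
  exact ⟨PySem.Int.floordiv a M, by linarith⟩

lemma pvModCongr (a b M : Int) (hM : M ≠ 0) (h : M ∣ a - b) :
    PySem.Int.mod a M = PySem.Int.mod b M := by
  have hd : M ∣ (PySem.Int.mod a M - PySem.Int.mod b M) := by
    have ha := pvModDvdSub a M
    have hb := pvModDvdSub b M
    have : PySem.Int.mod a M - PySem.Int.mod b M
        = (a - b) - (a - PySem.Int.mod a M) + (b - PySem.Int.mod b M) := by ring
    rw [this]
    exact dvd_add (dvd_sub h ha) hb
  have habs : |M| ∣ (PySem.Int.mod a M - PySem.Int.mod b M) := (abs_dvd _ _).mpr hd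
  have hlt : |PySem.Int.mod a M - PySem.Int.mod b M| < |M| := by
    rcases lt_or_gt_of_ne hM with hneg | hpos
    · have b1 := PySem.Int.mod_neg_bounds a hneg
      have b2 := PySem.Int.mod_neg_bounds b hneg
      rw [abs_of_neg hneg, abs_lt]
      constructor <;> linarith [b1.1, b1.2, b2.1, b2.2]
    · have b1 := PySem.Int.mod_nonneg a hpos
      have b2 := PySem.Int.mod_nonneg b hpos
      have c1 := PySem.Int.mod_lt a hpos
      have c2 := PySem.Int.mod_lt b hpos
      rw [abs_of_pos hpos, abs_lt]
      constructor <;> linarith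
  have := Int.eq_zero_of_abs_lt_dvd habs hlt
  linarith

lemma pvModMulL (a b M : Int) (hM : M ≠ 0) :
    PySem.Int.mod (PySem.Int.mod a M * b) M = PySem.Int.mod (a * b) M := by
  apply pvModCongr _ _ _ hM
  have h := dvd_neg.mpr (pvModDvdSub a M)
  rw [neg_sub] at h
  have : PySem.Int.mod a M * b - a * b = (PySem.Int.mod a M - a) * b := by ring
  rw [this]
  exact h.mul_right b

lemma pvModMulR (a b M : Int) (hM : M ≠ 0) :
    PySem.Int.mod (a * PySem.Int.mod b M) M = PySem.Int.mod (a * b) M := by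
  rw [mul_comm a, mul_comm a]
  exact pvModMulL b a M hM

-- the value B's scan stores at offset k of its list: exclusive prefix product, reduced (leading 1 literal)
def pvPre (M : Int) (xs : List Int) (k : Nat) : Int :=
  if k = 0 then 1 else PySem.Int.mod ((xs.take k).prod) M

lemma pvPscanSpec (M : Int) (hM : M ≠ 0) :
    ∀ N xs, List.length xs = N → xs ≠ [] →
      pvPscan M xs = ((List.range xs.length).map (pvPre M xs), PySem.Int.mod xs.prod M) := by
  intro N
  induction N using Nat.strong_induction_on with
  | _ N ih =>
    intro xs hlen hne
    rw [pvPscan]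
    by_cases h1 : xs.length ≤ 1
    · rw [dif_pos h1]
      obtain ⟨x, rfl⟩ : ∃ x, xs = [x] := by
        cases xs with
        | nil => exact absurd rfl hne
        | cons y ys =>
          cases ys with
          | nil => exact ⟨y, rfl⟩
          | cons z zs => simp at h1
      simp [pvPre, PySem.List.pyGetD]
    · rw [dif_neg h1]
      simp only [PySem.List.slice_to_natCast, PySem.List.slice_from_natCast]
      have hlen2 : 2 ≤ xs.length := by omega
      set mid : Nat := xs.length / 2 with hmid
      have hmid1 : 1 ≤ mid := by omega
      have hmidlt : mid < xs.length := by omega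
      set lft := xs.take mid with hlft
      set rgt := xs.drop mid with hrgt
      have hllen : lft.length = mid := by simp [hlft]; omega
      have hrlen : rgt.length = xs.length - mid := by simp [hrgt]
      have hL := ih lft.length (by omega) lft rfl
        (by intro h; rw [h] at hllen; simp at hllen; omega)
      have hR := ih rgt.length (by omega) rgt rfl
        (by intro h; rw [h] at hrlen; simp at hrlen; omega)
      rw [hL, hR]
      refine Prod.ext ?_ ?_ <;> dsimp only
      · -- the list component
        have hsplit : List.range xs.length
            = List.range mid ++ (List.range (rgt.length)).map (fun j => mid + j) := by
          rw [hrlen]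
          conv_lhs => rw [show xs.length = mid + (xs.length - mid) from by omega]
          rw [List.range_add]
        rw [hsplit, List.map_append, List.map_map, List.map_map]
        congr 1
        · -- left part: prefixes < mid agree
          rw [hllen]
          refine List.map_congr_left (fun k hk => ?_)
          have hkm : k < mid := List.mem_range.mp hk
          unfold pvPre
          split_ifs with h0
          · rfl
          · rw [hlft, List.take_take, min_eq_left (by omega)]
        · -- right part: pl folded into the right prefixes
          refine List.map_congr_left (fun j hj => ?_)
          simp only [Function.comp]
          have hjr : j < rgt.length := List.mem_range.mp hj
          unfold pvPre
          by_cases hj0 : j = 0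
          · subst hj0
            rw [if_pos rfl, if_neg (by omega), mul_one]
            have h := pvModMulL lft.prod 1 M hM
            rw [mul_one, mul_one] at h
            rw [h, hlft]
            norm_num
          · rw [if_neg hj0, if_neg (by omega)]
            rw [pvModMulR _ _ _ hM, pvModMulL _ _ _ hM]
            congr 1
            have htake : xs.take (mid + j) = lft ++ rgt.take j := by
              rw [hlft, hrgt, ← List.take_add]
            rw [htake, List.prod_append]
      · -- the total product
        rw [pvModMulR _ _ _ hM, pvModMulL _ _ _ hM]
        congr 1
        rw [hlft, hrgt, ← List.prod_append, List.take_append_drop]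

-- pyRange 1 m 1 is the casts of range' 1 (m-1)
lemma pvRangeEq (m : Nat) :
    PySem.List.pyRange 1 (m:Int) 1 = (List.range' 1 (m-1)).map (fun k : Nat => (k : Int)) := by
  rw [PySem.List.pyRange_one]
  have h1 : ((m:Int) - 1).toNat = m - 1 := by omega
  rw [h1, List.range'_eq_map_range, List.map_map]
  refine List.map_congr_left (fun a _ => ?_)
  simp [Function.comp]

lemma pvProdRange' (k : Nat) :
    (((List.range' 1 k).map (fun j : Nat => (j : Int))).prod) = ((Nat.factorial k : Nat) : Int) := by
  induction k with
  | zero => simp [Nat.factorial]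
  | succ k ih =>
    rw [List.range'_concat, List.map_append, List.prod_append, ih]
    simp [Nat.factorial_succ]
    ring

-- for M ≠ 0 and k ≥ 1, A's running value IS factorial(k) % M
lemma pvAnsFact (M : Int) (hM : M ≠ 0) :
    ∀ k : Nat, 1 ≤ k → pvAns M k = PySem.Int.mod ((Nat.factorial k : Nat) : Int) M := by
  intro k hk
  induction k with
  | zero => omega
  | succ k ih =>
    by_cases hk1 : 1 ≤ k
    · have hrec := ih hk1
      show PySem.Int.mod (pvAns M k * ((k : Int) + 1)) M = _
      rw [hrec, pvModMulL _ _ _ hM]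
      have hfact : ((Nat.factorial (k+1) : Nat) : Int) = ((Nat.factorial k : Nat) : Int) * ((k : Int) + 1) := by
        rw [Nat.factorial_succ]
        push_cast
        ring
      rw [hfact]
    · have hk0 : k = 0 := by omega
      subst hk0
      show PySem.Int.mod (pvAns M 0 * ((0 : Int) + 1)) M = _
      norm_num [pvAns, Nat.factorial]

-- B's table is [pvAns 0, …, pvAns (m-1)] too (m ≥ 2, M ≠ 0)
lemma pvBEq (M : Int) (m : Nat) (hm : 2 ≤ m) (hM : M ≠ 0) :
    fact_all_alt (m : Int) M = (List.range m).map (pvAns M) := by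
  unfold fact_all_alt
  rw [if_neg (by omega), if_neg (by exact_mod_cast (by omega : ¬ (m:Int) = 1))]
  set xs := PySem.List.pyRange 1 (m:Int) 1 with hxs
  have hxr : xs = (List.range' 1 (m-1)).map (fun k : Nat => (k : Int)) := pvRangeEq m
  have hxlen : xs.length = m - 1 := by rw [hxr]; simp
  have hxne : xs ≠ [] := by
    rw [hxr]
    intro h
    simp at h
    omega
  rw [pvPscanSpec M hM xs.length xs rfl hxne]
  simp only
  have hpre : ∀ k ∈ List.range (m-1), pvPre M xs k = pvAns M k := by
    intro k hk
    have hkm : k < m - 1 := List.mem_range.mp hk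
    unfold pvPre
    split_ifs with h0
    · subst h0; rfl
    · have htake : xs.take k = (List.range' 1 k).map (fun j : Nat => (j : Int)) := by
        rw [hxr, ← List.map_take]
        congr 1
        have hsplit : List.range' 1 (m-1) = List.range' 1 k ++ List.range' (1+k) (m-1-k) := by
          have h : List.range' 1 k 1 ++ List.range' (1+1*k) (m-1-k) 1
              = List.range' 1 (k+(m-1-k)) 1 := List.range'_append
          simp only [one_mul] at h
          conv_lhs => rw [show m - 1 = k + (m-1-k) from by omega]
          exact h.symm
        rw [hsplit, List.take_left' (by simp)]
      rw [htake, pvProdRange', ← pvAnsFact M hM k (by omega)]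
  have hprod : PySem.Int.mod xs.prod M = pvAns M (m-1) := by
    rw [hxr, pvProdRange', ← pvAnsFact M hM (m-1) (by omega)]
  rw [hxlen, List.map_congr_left hpre, hprod]
  have : m = (m - 1) + 1 := by omega
  rw [this, List.range_succ, List.map_append]
  simp

-- ===== VERDICT (by name: the statement is the Claim_ definition above) =====
theorem fact_all_spec : Claim_equal_fact_all := by
  intro n M _ hpre
  unfold Spec_fact_all
  by_cases hn : n ≤ 0
  · rw [pvFoldEq, PySem.List.pyRange_one_eq_nil (by omega)]
    unfold fact_all_alt
    rw [if_pos hn]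
    simp [Int.toNat_of_nonpos hn]
  · obtain ⟨m, rfl⟩ : ∃ m : Nat, n = (m : Int) := ⟨n.toNat, by omega⟩
    have hm : 1 ≤ m := by omega
    by_cases hm1 : m = 1
    · subst hm1
      rw [pvAEq M 1 le_rfl]
      unfold fact_all_alt
      norm_num
      rfl
    · have hM : M ≠ 0 := by
        rcases hpre with h | h
        · exfalso; omega
        · exact h
      rw [pvAEq M m hm, pvBEq M m (by omega) hM]
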